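-- pv_equiv track=rewrite | github.com/Jaswanth-Kumar-2007/Python-Works | Lab-Problems/Q6.py | displayPattern
-- ===== SOURCE A (Python) =====
-- def displayPattern(n):
--     res = []
--     for i in range(1,n+1):
--         s = str()
--         for j in range(1,i+1):
--             s = s + " " + str(j)
--         res.append(s[::-1])
--     return res
-- ===== SOURCE B (Python) =====
-- def displayPattern(n):
--     res = []
--     prev = ""
--     for i in range(1, n + 1):
--         prev = str(i)[::-1] + " " + prev
--         res.append(prev)
--     return res
-- ===== Notes on version B (the rewrite author's own statement) =====
-- stated objective: faster
-- what changed: B drops A's inner loop that rebuilds and reverses each row from scratch, instead maintaining one running string via the recurrence row_i = reverse(str(i)) + " " + row_{i-1}.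
import Mathlib
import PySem

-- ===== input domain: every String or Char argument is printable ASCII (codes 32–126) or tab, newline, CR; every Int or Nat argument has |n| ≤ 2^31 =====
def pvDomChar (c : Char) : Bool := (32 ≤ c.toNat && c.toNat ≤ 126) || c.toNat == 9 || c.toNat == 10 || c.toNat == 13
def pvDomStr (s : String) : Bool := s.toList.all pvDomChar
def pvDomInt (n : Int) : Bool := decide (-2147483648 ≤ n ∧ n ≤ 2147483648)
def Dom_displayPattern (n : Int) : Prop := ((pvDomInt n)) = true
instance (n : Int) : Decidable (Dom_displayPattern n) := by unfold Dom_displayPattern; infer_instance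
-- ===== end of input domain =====

-- B replaces A's inner rebuild-and-reverse loop by a single running string: each row is
-- reverse(str(i)) ++ " " ++ previous row (objective: faster, reuses the previous row).

-- ===== PORT A =====
def displayPattern (n : Int) : List String :=
  (PySem.List.pyRange 1 (n + 1) 1).foldl
    (fun res i =>
      let s := (PySem.List.pyRange 1 (i + 1) 1).foldl
        (fun s j => s ++ " " ++ PySem.Int.toStr j) ""
      res ++ [(PySem.Str.slice? s none none (-1)).getD ""])
    []

-- ===== PORT B =====
def displayPattern_alt (n : Int) : List String :=
  ((PySem.List.pyRange 1 (n + 1) 1).foldl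
    (fun (p : List String × String) i =>
      let prev := (PySem.Str.slice? (PySem.Int.toStr i) none none (-1)).getD "" ++ " " ++ p.2
      (p.1 ++ [prev], prev))
    ([], "")).1

-- ===== PRECONDITION & SPEC =====
def Spec_displayPattern (n : Int) (out : List String) : Prop := out = displayPattern_alt n
instance (n : Int) (out : List String) : Decidable (Spec_displayPattern n out) := by unfold Spec_displayPattern; infer_instance

-- ===== CLAIM (what is proved, stated in full; the proofs are below) =====
def Claim_equal_displayPattern : Prop := ∀ (n : Int), Dom_displayPattern n → Spec_displayPattern n (displayPattern n)

-- ===== LEMMAS AND PROOFS =====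

/-- string reversal, as `s[::-1]` computes it -/
def pvRev (s : String) : String := String.ofList s.toList.reverse

theorem pvRev_slice? (s : String) :
    (PySem.Str.slice? s none none (-1)).getD "" = pvRev s := by
  rw [PySem.Str.slice?_none_none_neg_one]; rfl

theorem pvRev_append (a b : String) : pvRev (a ++ b) = pvRev b ++ pvRev a := by
  apply String.toList_inj.mp; simp [pvRev]

theorem pvRev_space : pvRev " " = " " := by decide

/-- A's inner string for row `i = m` -/
def pvInner (m : Nat) : String :=
  (PySem.List.pyRange 1 ((m : Int) + 1) 1).foldl
    (fun s j => s ++ " " ++ PySem.Int.toStr j) ""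

theorem pvInner_zero : pvInner 0 = "" := by
  simp [pvInner, PySem.List.pyRange_one_eq_nil (by omega : (1:Int) ≤ 1)]

theorem pvInner_succ (m : Nat) :
    pvInner (m + 1) = pvInner m ++ " " ++ PySem.Int.toStr ((m : Int) + 1) := by
  unfold pvInner
  have hr : PySem.List.pyRange 1 ((m : Int) + 1 + 1) 1
      = PySem.List.pyRange 1 ((m : Int) + 1) 1 ++ [(m : Int) + 1] :=
    PySem.List.pyRange_one_succ_right (show (1:Int) ≤ (m : Int) + 1 by omega)
  push_cast
  rw [hr, List.foldl_append]
  simp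

/-- joint invariant: B's fold carries A's output list and the reversed current row -/
theorem pvLoop (m : Nat) :
    (PySem.List.pyRange 1 ((m : Int) + 1) 1).foldl
        (fun (p : List String × String) i =>
          let prev := (PySem.Str.slice? (PySem.Int.toStr i) none none (-1)).getD "" ++ " " ++ p.2
          (p.1 ++ [prev], prev)) ([], "")
      = ((PySem.List.pyRange 1 ((m : Int) + 1) 1).foldl
          (fun res i =>
            let s := (PySem.List.pyRange 1 (i + 1) 1).foldl
              (fun s j => s ++ " " ++ PySem.Int.toStr j) ""
            res ++ [(PySem.Str.slice? s none none (-1)).getD ""]) [],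
         pvRev (pvInner m)) := by
  induction m with
  | zero =>
    simp [PySem.List.pyRange_one_eq_nil (by omega : (1:Int) ≤ 1), pvInner_zero, pvRev]
  | succ m ih =>
    have hr : PySem.List.pyRange 1 ((m : Int) + 1 + 1) 1
        = PySem.List.pyRange 1 ((m : Int) + 1) 1 ++ [(m : Int) + 1] :=
      PySem.List.pyRange_one_succ_right (show (1:Int) ≤ (m : Int) + 1 by omega)
    have hprev : pvRev (PySem.Int.toStr ((m : Int) + 1)) ++ " " ++ pvRev (pvInner m)
        = pvRev (pvInner (m + 1)) := by
      rw [pvInner_succ, pvRev_append, pvRev_append, pvRev_space]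
      simp [String.append_assoc]
    push_cast
    rw [hr, List.foldl_append, List.foldl_append, ih]
    simp only [List.foldl_cons, List.foldl_nil, pvRev_slice?]
    refine Prod.ext ?_ ?_
    · simp only [hprev]
      have : ((PySem.List.pyRange 1 ((m : Int) + 1 + 1) 1).foldl
          (fun s j => s ++ " " ++ PySem.Int.toStr j) "") = pvInner (m + 1) := by
        unfold pvInner; push_cast; rfl
      simp [this]
    · simpa using hprev

theorem displayPattern_eq_alt (n : Int) : displayPattern n = displayPattern_alt n := by
  unfold displayPattern displayPattern_alt
  by_cases h : n ≤ 0
  · rw [PySem.List.pyRange_one_eq_nil (by omega : n + 1 ≤ 1)]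
    rfl
  · obtain ⟨m, rfl⟩ : ∃ m : Nat, n = (m : Int) := ⟨n.toNat, by omega⟩
    rw [pvLoop m]

-- ===== VERDICT (by name: the statement is the Claim_ definition above) =====
theorem displayPattern_spec : Claim_equal_displayPattern := by
  intro n _
  unfold Spec_displayPattern
  exact displayPattern_eq_alt n
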